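-- pv_equiv track=rewrite | github.com/ShenhanQian/GaussianAvatars | reference_tracker/mvht/data/multi_view_head_dataset.py | get_number_after_prefix
-- ===== SOURCE A (Python) =====
-- def get_number_after_prefix(string, prefix):
--     i = string.find(prefix)
--     if i != -1:
--         number_begin = i + len(prefix)
--         assert number_begin < len(string), f"No number found behind prefix '{prefix}'"
--         assert string[number_begin].isdigit(), f"No number found behind prefix '{prefix}'"
--
--         non_digit_indices = [i for i, c in enumerate(string[number_begin:]) if not c.isdigit()]
--         if len(non_digit_indices) > 0:
--             number_end = number_begin + min(non_digit_indices)
--             return int(string[number_begin:number_end])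
--         else:
--             return int(string[number_begin:])
--     else:
--         return None
-- ===== SOURCE B (Python) =====
-- def get_number_after_prefix(string, prefix):
--     i = string.find(prefix)
--     if i == -1:
--         return None
--     number_begin = i + len(prefix)
--     assert number_begin < len(string), f"No number found behind prefix '{prefix}'"
--     assert string[number_begin].isdigit(), f"No number found behind prefix '{prefix}'"
--     digits = []
--     for c in string[number_begin:]:
--         if not c.isdigit():
--             break
--         digits.append(c)
--     return int(''.join(digits))
-- ===== Notes on version B (the rewrite author's own statement) =====
-- stated objective: simpler
-- what changed: B replaces A's collect-all-non-digit-indices list comprehension plus min() plus if/else slicing with a single early-stopping scan that consumes the leading digit run after the prefix.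
import Mathlib
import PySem

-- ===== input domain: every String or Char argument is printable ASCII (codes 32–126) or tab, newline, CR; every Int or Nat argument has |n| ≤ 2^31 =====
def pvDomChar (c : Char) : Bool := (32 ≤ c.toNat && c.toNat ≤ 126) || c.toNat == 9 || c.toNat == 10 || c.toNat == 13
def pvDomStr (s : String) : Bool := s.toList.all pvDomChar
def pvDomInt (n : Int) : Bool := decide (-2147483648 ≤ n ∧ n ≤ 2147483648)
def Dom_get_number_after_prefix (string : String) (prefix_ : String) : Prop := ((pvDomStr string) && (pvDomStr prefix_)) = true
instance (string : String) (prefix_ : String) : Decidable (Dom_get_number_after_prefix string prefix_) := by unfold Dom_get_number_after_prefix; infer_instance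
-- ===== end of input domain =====

-- B replaces the collect-all-non-digit-indices / min / if-else block with a single
-- early-stopping scan that consumes the leading digit run (objective: simpler).

-- ===== PORT A =====
-- int() on the digit slice is exact here: inside Pre_ the slice is a nonempty digit run,
-- so int() never raises and (ofChars? _).getD 0 is its value.
def get_number_after_prefix (string : String) (prefix_ : String) : Option Int :=
  let cs := string.toList
  let ps := prefix_.toList
  let i := PySem.Chars.find cs ps
  if i ≠ -1 then
    let nb : Int := i + ps.length
    if nb < cs.length then            -- assert number_begin < len(string); outside Pre_ (AssertionError) the port returns none
      match PySem.List.pyGet? cs nb with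
      | some c =>
        if PySem.Chars.isdigit c then -- assert string[number_begin].isdigit(); outside Pre_ the port returns none
          let tail := PySem.List.slice cs (some nb) none
          let non_digit_indices :=
            ((PySem.List.enumerate tail 0).filter (fun p => !PySem.Chars.isdigit p.2)).map (·.1)
          if non_digit_indices.length > 0 then
            match PySem.List.min? non_digit_indices (fun x => x) with
            | some m => some ((PySem.Int.ofChars? (PySem.List.slice cs (some nb) (some (nb + m)))).getD 0)
            | none => none            -- unreachable: the list is nonempty
          else
            some ((PySem.Int.ofChars? tail).getD 0)
        else none
      | none => none
    else none
  else none

-- ===== PORT B =====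
-- the 'for c in …: if not c.isdigit(): break; digits.append(c)' loop of Source B
def takeDigits : List Char → List Char
  | [] => []
  | c :: t => if PySem.Chars.isdigit c then c :: takeDigits t else []

def get_number_after_prefix_alt (string : String) (prefix_ : String) : Option Int :=
  let cs := string.toList
  let ps := prefix_.toList
  let i := PySem.Chars.find cs ps
  if i = -1 then none
  else
    let nb : Int := i + ps.length
    if nb < cs.length then            -- assert; outside Pre_ the port returns none
      match PySem.List.pyGet? cs nb with
      | some c =>
        if PySem.Chars.isdigit c then -- assert; outside Pre_ the port returns none
          some ((PySem.Int.ofChars? (takeDigits (PySem.List.slice cs (some nb) none))).getD 0)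
        else none
      | none => none
    else none

-- ===== PRECONDITION & SPEC =====
-- Pre_ excludes exactly the inputs where A raises AssertionError: the prefix occurs but is
-- not immediately followed by a digit (or is at the very end of the string).
def Pre_get_number_after_prefix (string : String) (prefix_ : String) : Prop :=
  let cs := string.toList
  let i := PySem.Chars.find cs prefix_.toList
  i = -1 ∨ (i + prefix_.toList.length < cs.length ∧
    (PySem.List.pyGet? cs (i + prefix_.toList.length)).any (fun c => PySem.Chars.isdigit c) = true)

instance (string : String) (prefix_ : String) : Decidable (Pre_get_number_after_prefix string prefix_) := by
  unfold Pre_get_number_after_prefix; infer_instance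

def pvWitness_get_number_after_prefix : String × String := ("abc123x", "bc")

def Spec_get_number_after_prefix (string : String) (prefix_ : String) (out : Option Int) : Prop := out = get_number_after_prefix_alt string prefix_
instance (string : String) (prefix_ : String) (out : Option Int) : Decidable (Spec_get_number_after_prefix string prefix_ out) := by unfold Spec_get_number_after_prefix; infer_instance

-- ===== CLAIM (what is proved, stated in full; the proofs are below) =====
def Claim_equal_get_number_after_prefix : Prop := ∀ (string : String) (prefix_ : String), Dom_get_number_after_prefix string prefix_ → Pre_get_number_after_prefix string prefix_ → Spec_get_number_after_prefix string prefix_ (get_number_after_prefix string prefix_)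

-- ===== LEMMAS AND PROOFS =====

def ndsFrom (s : Int) (l : List Char) : List Int :=
  ((PySem.List.enumerate l s).filter (fun p => !PySem.Chars.isdigit p.2)).map (·.1)

lemma takeDigits_eq_takeWhile (l : List Char) :
    takeDigits l = l.takeWhile (fun c => PySem.Chars.isdigit c) := by
  induction l with
  | nil => rfl
  | cons c t ih => simp [takeDigits, List.takeWhile_cons, ih]

lemma mem_ndsFrom_le (l : List Char) (s y : Int) (h : y ∈ ndsFrom s l) : s ≤ y := by
  simp only [ndsFrom, List.mem_map, List.mem_filter] at h
  obtain ⟨p, ⟨hp, _⟩, rfl⟩ := h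
  rw [PySem.List.mem_enumerate_iff] at hp
  obtain ⟨k, hk, rfl⟩ := hp
  simp

lemma ndsFrom_spec (l : List Char) (s : Int) :
    (ndsFrom s l = [] ∧ takeDigits l = l) ∨
    (∃ t, ndsFrom s l = (s + (takeDigits l).length) :: t ∧ ∀ y ∈ t, s + ((takeDigits l).length : Int) < y) := by
  induction l generalizing s with
  | nil => left; simp [ndsFrom, PySem.List.enumerate_nil, takeDigits]
  | cons c t ih =>
    by_cases hd : PySem.Chars.isdigit c
    · have hstep : ndsFrom s (c :: t) = ndsFrom (s + 1) t := by
        simp [ndsFrom, PySem.List.enumerate_cons, hd]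
      have hlen : ((takeDigits (c :: t)).length : Int) = (takeDigits t).length + 1 := by
        simp [takeDigits, hd]
      rcases ih (s + 1) with ⟨h1, h2⟩ | ⟨t', h1, h2⟩
      · left
        refine ⟨by rw [hstep, h1], ?_⟩
        simp [takeDigits, hd, h2]
      · right
        refine ⟨t', ?_, ?_⟩
        · have he : (s + 1) + ((takeDigits t).length : Int) = s + ((takeDigits (c :: t)).length : Int) := by omega
          rw [hstep, h1, he]
        · intro y hy; have := h2 y hy; omega
    · right
      have hstep : ndsFrom s (c :: t) = s :: ndsFrom (s + 1) t := by
        simp [ndsFrom, PySem.List.enumerate_cons, hd]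
      have hlen : ((takeDigits (c :: t)).length : Int) = 0 := by
        simp [takeDigits, hd]
      refine ⟨ndsFrom (s + 1) t, ?_, ?_⟩
      · rw [hstep]; congr 1; omega
      · intro y hy; have := mem_ndsFrom_le t (s + 1) y hy; omega

lemma foldl_min_eq_self (t : List Int) (a : Int) (h : ∀ y ∈ t, a ≤ y) :
    t.foldl min a = a := by
  have h1 := (PySem.List.foldl_min_le t a).1
  rcases PySem.List.foldl_min_mem t a with h2 | h2
  · exact h2
  · exact le_antisymm h1 (h _ h2)

lemma extract_eq (l : List Char) :
    (if (ndsFrom 0 l).length > 0 then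
       match PySem.List.min? (ndsFrom 0 l) (fun x => x) with
       | some m => l.take m.toNat
       | none => ([] : List Char)
     else l) = takeDigits l := by
  rcases ndsFrom_spec l 0 with ⟨h1, h2⟩ | ⟨t, h1, h2⟩
  · simp [h1, h2]
  · have hlen : ((takeDigits l).length : Int) = 0 + ((takeDigits l).length : Int) := by omega
    rw [h1]
    simp only [List.length_cons, gt_iff_lt, Nat.succ_pos, if_pos]
    rw [PySem.List.min?_id_cons]
    have hfold : t.foldl min (0 + ((takeDigits l).length : Int)) = 0 + ((takeDigits l).length : Int) := by
      exact foldl_min_eq_self t _ (fun y hy => le_of_lt (h2 y hy))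
    simp only [hfold]
    have : ((0 : Int) + ((takeDigits l).length : Int)).toNat = (takeDigits l).length := by omega
    rw [this, takeDigits_eq_takeWhile]
    exact (List.prefix_iff_eq_take.mp (List.takeWhile_prefix _)).symm

lemma fold_nds (tail : List Char) :
    ((PySem.List.enumerate tail 0).filter (fun p => !PySem.Chars.isdigit p.2)).map (·.1) = ndsFrom 0 tail := rfl

lemma branch_eq (cs : List Char) (nb : Int) (h0 : 0 ≤ nb) :
    (if ((((PySem.List.enumerate (PySem.List.slice cs (some nb) none) 0).filter (fun p => !PySem.Chars.isdigit p.2)).map (·.1)).length > 0) then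
       match PySem.List.min? (((PySem.List.enumerate (PySem.List.slice cs (some nb) none) 0).filter (fun p => !PySem.Chars.isdigit p.2)).map (·.1)) (fun x => x) with
       | some m => some ((PySem.Int.ofChars? (PySem.List.slice cs (some nb) (some (nb + m)))).getD 0)
       | none => none
     else some ((PySem.Int.ofChars? (PySem.List.slice cs (some nb) none)).getD 0))
    = some ((PySem.Int.ofChars? (takeDigits (PySem.List.slice cs (some nb) none))).getD (0 : Int)) := by
  rw [fold_nds]
  set tail := PySem.List.slice cs (some nb) none with htl
  have key := extract_eq tail
  by_cases hnil : ndsFrom 0 tail = []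
  · rw [hnil] at key ⊢
    simp only [List.length_nil, gt_iff_lt, lt_irrefl, if_false] at key ⊢
    conv_lhs => rw [key]
  · have hpos : (ndsFrom 0 tail).length > 0 := List.length_pos_iff.mpr hnil
    rw [if_pos hpos] at key ⊢
    match hm : PySem.List.min? (ndsFrom 0 tail) (fun x => x) with
    | none => rw [PySem.List.min?_eq_none_iff] at hm; exact absurd hm hnil
    | some m =>
      rw [hm] at key
      dsimp only at key ⊢
      have hm0 : 0 ≤ m := mem_ndsFrom_le tail 0 m (PySem.List.min?_mem hm)
      have hb : nb = ((nb.toNat : Nat) : Int) := by omega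
      have hb2 : nb + m = ((nb.toNat + m.toNat : Nat) : Int) := by omega
      rw [hb2, hb, PySem.List.slice_natCast]
      simp only [Int.toNat_natCast, Nat.add_sub_cancel_left]
      have hdrop : cs.drop nb.toNat = tail := by
        rw [htl]
        conv_rhs => rw [hb, PySem.List.slice_from_natCast]
      rw [hdrop, key]

-- ===== VERDICT (by name: the statement is the Claim_ definition above) =====
theorem get_number_after_prefix_spec : Claim_equal_get_number_after_prefix := by
  intro string prefix_ _ hpre
  unfold Spec_get_number_after_prefix get_number_after_prefix get_number_after_prefix_alt
  dsimp only
  unfold Pre_get_number_after_prefix at hpre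
  dsimp only at hpre
  by_cases hi : PySem.Chars.find string.toList prefix_.toList = -1
  · simp [hi]
  · rcases hpre with h | ⟨hlt, hdig⟩
    · exact absurd h hi
    have hi0 : 0 ≤ PySem.Chars.find string.toList prefix_.toList := by
      rw [PySem.Chars.find_nonneg_iff]
      exact (PySem.Chars.find_ne_neg_one_iff _ _).mp hi
    simp only [ne_eq, hi, not_false_iff, if_true, if_false, if_pos hlt]
    rcases hg : PySem.List.pyGet? string.toList
        (PySem.Chars.find string.toList prefix_.toList + (prefix_.toList.length : Int)) with _ | c
    · exact absurd hdig (by rw [hg]; simp)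
    · rw [hg] at hdig
      simp at hdig
      simp only [hdig, if_true]
      exact branch_eq string.toList _ (by omega)
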